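-- pv_equiv track=rewrite | github.com/QAsQ/Blokus | app/models/piece/trigon_piece.py | _action_generate
-- ===== SOURCE A (Python) =====
-- share_corner = 0
--
-- share_edge = 1
--
-- occupy = 2
--
-- def _action_generate(piece_shape): # todo
--     irrelevant = -1
--     def get_act(x, y, ano_pos):
--         dx = abs(x + ano_pos[0])
--         dy = abs(y + ano_pos[1])
--         if dx + dy == 0:
--             return occupy
--         if dx <= 1 and dy <= 1:
--             if dx + dy == 2:
--                 return share_corner
--             else:
--                 return share_edge
--         return irrelevant
--
--     res_action = []
--     for x in range(-5, 6):
--         for y in range(-5, 6):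
--             action = irrelevant
--             for ano_pos in piece_shape:
--                 action = max(action, get_act(x, y, ano_pos))
--                 if action == occupy:
--                     break
--             if action == irrelevant:
--                 continue
--             res_action.append((x, y, action))
--     return res_action
-- ===== SOURCE B (Python) =====
-- share_corner = 0
-- share_edge = 1
-- occupy = 2
--
-- def _action_generate(piece_shape):
--     # Build the occupied-cell set once, then answer each grid cell with
--     # constant-time membership tests instead of scanning the whole shape.
--     cells = set(piece_shape)
--     res = []
--     for x in range(-5, 6):
--         for y in range(-5, 6):
--             if (-x, -y) in cells:
--                 res.append((x, y, occupy))
--             elif ((-x - 1, -y) in cells or (-x + 1, -y) in cells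
--                   or (-x, -y - 1) in cells or (-x, -y + 1) in cells):
--                 res.append((x, y, share_edge))
--             elif ((-x - 1, -y - 1) in cells or (-x - 1, -y + 1) in cells
--                   or (-x + 1, -y - 1) in cells or (-x + 1, -y + 1) in cells):
--                 res.append((x, y, share_corner))
--     return res
-- ===== Notes on version B (the rewrite author's own statement) =====
-- stated objective: faster
-- what changed: Builds the set of shape cells once and answers each of the 121 grid cells with a few constant-time membership tests (occupy/edge/corner priority chain), instead of folding max(get_act) over the whole shape inside every grid cell.
import Mathlib
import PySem

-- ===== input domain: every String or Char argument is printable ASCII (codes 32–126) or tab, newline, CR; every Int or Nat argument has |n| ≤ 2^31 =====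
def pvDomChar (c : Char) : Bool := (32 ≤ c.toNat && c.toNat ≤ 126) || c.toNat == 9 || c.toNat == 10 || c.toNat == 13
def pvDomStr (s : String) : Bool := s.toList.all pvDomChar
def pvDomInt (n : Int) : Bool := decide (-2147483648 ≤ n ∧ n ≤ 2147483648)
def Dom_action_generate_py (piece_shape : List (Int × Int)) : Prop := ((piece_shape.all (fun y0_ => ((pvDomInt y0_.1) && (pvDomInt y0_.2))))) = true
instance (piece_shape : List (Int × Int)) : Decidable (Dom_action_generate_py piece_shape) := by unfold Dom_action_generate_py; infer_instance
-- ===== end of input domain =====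

-- B replaces the per-cell scan of the whole shape by one set of shape cells built
-- once and a constant number of membership tests per grid cell (objective: faster).

-- ===== PORT A =====
-- get_act(x, y, ano_pos)
def pvGetAct (x y : Int) (p : Int × Int) : Int :=
  let dx := |x + p.1|
  let dy := |y + p.2|
  if dx + dy = 0 then 2
  else if dx ≤ 1 ∧ dy ≤ 1 then
    if dx + dy = 2 then 0 else 1
  else -1

-- the inner 'for ano_pos in piece_shape' loop with its 'break' on occupy
def pvALoop (x y : Int) : List (Int × Int) → Int → Int
  | [], acc => acc
  | p :: rest, acc =>
    let acc' := max acc (pvGetAct x y p)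
    if acc' = 2 then acc' else pvALoop x y rest acc'

def action_generate_py (piece_shape : List (Int × Int)) : List (Int × Int × Int) :=
  (PySem.List.pyRange (-5) 6 1).foldl (fun res x =>
    (PySem.List.pyRange (-5) 6 1).foldl (fun res y =>
      let action := pvALoop x y piece_shape (-1)
      if action = -1 then res else res ++ [(x, y, action)]) res) []

-- ===== PORT B =====
-- body of B's inner loop: priority chain of membership tests ('in cells')
def pvBCell (cells : PySem.Set (Int × Int)) (res : List (Int × Int × Int)) (x y : Int) :
    List (Int × Int × Int) :=
  if (-x, -y) ∈ cells then res ++ [(x, y, 2)]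
  else if (-x - 1, -y) ∈ cells ∨ (-x + 1, -y) ∈ cells ∨ (-x, -y - 1) ∈ cells ∨ (-x, -y + 1) ∈ cells then
    res ++ [(x, y, 1)]
  else if (-x - 1, -y - 1) ∈ cells ∨ (-x - 1, -y + 1) ∈ cells ∨ (-x + 1, -y - 1) ∈ cells ∨ (-x + 1, -y + 1) ∈ cells then
    res ++ [(x, y, 0)]
  else res

def action_generate_py_alt (piece_shape : List (Int × Int)) : List (Int × Int × Int) :=
  let cells := PySem.Set.ofList piece_shape
  (PySem.List.pyRange (-5) 6 1).foldl (fun res x =>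
    (PySem.List.pyRange (-5) 6 1).foldl (fun res y => pvBCell cells res x y) res) []

-- ===== PRECONDITION & SPEC =====
def Spec_action_generate_py (piece_shape : List (Int × Int)) (out : List (Int × Int × Int)) : Prop := out = action_generate_py_alt piece_shape
instance (piece_shape : List (Int × Int)) (out : List (Int × Int × Int)) : Decidable (Spec_action_generate_py piece_shape out) := by unfold Spec_action_generate_py; infer_instance

-- ===== CLAIM (what is proved, stated in full; the proofs are below) =====
def Claim_equal_action_generate_py : Prop := ∀ (piece_shape : List (Int × Int)), Dom_action_generate_py piece_shape → Spec_action_generate_py piece_shape (action_generate_py piece_shape)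

-- ===== LEMMAS AND PROOFS =====

-- priority chain 'occupy > edge > corner > irrelevant' as a value
def pvChain (c e d : Prop) [Decidable c] [Decidable e] [Decidable d] : Int :=
  if c then 2 else if e then 1 else if d then 0 else -1

-- max over the shape without A's break
def pvMVal (x y : Int) (ps : List (Int × Int)) : Int :=
  ps.foldr (fun p m => max (pvGetAct x y p) m) (-1)

theorem pvGetAct_bounds (x y : Int) (p : Int × Int) :
    -1 ≤ pvGetAct x y p ∧ pvGetAct x y p ≤ 2 := by
  simp only [pvGetAct]; split_ifs <;> omega

theorem pvMVal_bounds (x y : Int) (ps : List (Int × Int)) :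
    -1 ≤ pvMVal x y ps ∧ pvMVal x y ps ≤ 2 := by
  induction ps with
  | nil => simp [pvMVal]
  | cons p r ih =>
    have := pvGetAct_bounds x y p
    simp only [pvMVal, List.foldr_cons] at *
    omega

-- A's inner loop (with break) computes max acc (pvMVal …)
theorem pvALoop_eq_max (x y : Int) (ps : List (Int × Int)) :
    ∀ acc : Int, -1 ≤ acc → acc ≤ 2 → pvALoop x y ps acc = max acc (pvMVal x y ps) := by
  induction ps with
  | nil => intro acc h1 h2; simp [pvALoop, pvMVal]; omega
  | cons p r ih =>
    intro acc h1 h2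
    have hg := pvGetAct_bounds x y p
    have hm := pvMVal_bounds x y r
    have hfold : pvMVal x y (p :: r) = max (pvGetAct x y p) (pvMVal x y r) := by
      simp [pvMVal]
    simp only [pvALoop]
    by_cases hb : max acc (pvGetAct x y p) = 2
    · rw [if_pos hb, hfold]; omega
    · rw [if_neg hb, ih _ (by omega) (by omega), hfold]; omega

theorem pvGetAct_eq_chain (x y a b : Int) :
    pvGetAct x y (a, b) =
      pvChain ((-x, -y) = (a, b))
        ((-x - 1, -y) = (a, b) ∨ (-x + 1, -y) = (a, b) ∨ (-x, -y - 1) = (a, b) ∨ (-x, -y + 1) = (a, b))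
        ((-x - 1, -y - 1) = (a, b) ∨ (-x - 1, -y + 1) = (a, b) ∨ (-x + 1, -y - 1) = (a, b) ∨ (-x + 1, -y + 1) = (a, b)) := by
  unfold pvGetAct pvChain
  simp only [Prod.mk.injEq]
  rcases abs_cases (x + a) with ⟨h1, h1'⟩ | ⟨h1, h1'⟩ <;>
    rcases abs_cases (y + b) with ⟨h2, h2'⟩ | ⟨h2, h2'⟩ <;>
      simp only [h1, h2] <;> split_ifs <;> omega

theorem pvChain_max (pc pe pd cr er dr : Prop)
    [Decidable pc] [Decidable pe] [Decidable pd] [Decidable cr] [Decidable er] [Decidable dr] :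
    max (pvChain pc pe pd) (pvChain cr er dr) = pvChain (pc ∨ cr) (pe ∨ er) (pd ∨ dr) := by
  by_cases h1 : pc <;> by_cases h2 : pe <;> by_cases h3 : pd <;>
    by_cases h4 : cr <;> by_cases h5 : er <;> by_cases h6 : dr <;>
      simp [pvChain, h1, h2, h3, h4, h5, h6]

theorem pvChain_congr {a b c a' b' c' : Prop}
    [Decidable a] [Decidable b] [Decidable c] [Decidable a'] [Decidable b'] [Decidable c']
    (ha : a ↔ a') (hb : b ↔ b') (hc : c ↔ c') : pvChain a b c = pvChain a' b' c' := by
  simp [pvChain, ha, hb, hc]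

theorem pvMVal_eq_chain (x y : Int) (ps : List (Int × Int)) :
    pvMVal x y ps =
      pvChain ((-x, -y) ∈ ps)
        ((-x - 1, -y) ∈ ps ∨ (-x + 1, -y) ∈ ps ∨ (-x, -y - 1) ∈ ps ∨ (-x, -y + 1) ∈ ps)
        ((-x - 1, -y - 1) ∈ ps ∨ (-x - 1, -y + 1) ∈ ps ∨ (-x + 1, -y - 1) ∈ ps ∨ (-x + 1, -y + 1) ∈ ps) := by
  induction ps with
  | nil => simp [pvMVal, pvChain]
  | cons p r ih =>
    obtain ⟨a, b⟩ := p
    have : pvMVal x y ((a, b) :: r) = max (pvGetAct x y (a, b)) (pvMVal x y r) := by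
      simp [pvMVal]
    rw [this, ih, pvGetAct_eq_chain, pvChain_max]
    exact pvChain_congr (by simp [List.mem_cons]) (by simp [List.mem_cons]; tauto)
      (by simp [List.mem_cons]; tauto)

-- the two inner-loop bodies agree for every cell
theorem pvBody_eq (ps : List (Int × Int)) (res : List (Int × Int × Int)) (x y : Int) :
    (let action := pvALoop x y ps (-1);
     if action = -1 then res else res ++ [(x, y, action)]) =
      pvBCell (PySem.Set.ofList ps) res x y := by
  have h := pvALoop_eq_max x y ps (-1) (by omega) (by omega)
  have hm := pvMVal_bounds x y ps
  simp only [h, pvMVal_eq_chain, pvBCell, pvChain]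
  simp only [PySem.Set.mem_ofList]
  split_ifs <;> simp_all

theorem action_generate_eq (ps : List (Int × Int)) :
    action_generate_py ps = action_generate_py_alt ps := by
  simp only [action_generate_py, action_generate_py_alt]
  congr 1
  funext res x
  congr 1
  funext res' y
  exact pvBody_eq ps res' x y

-- ===== VERDICT (by name: the statement is the Claim_ definition above) =====
theorem action_generate_py_spec : Claim_equal_action_generate_py := by
  intro ps _
  unfold Spec_action_generate_py
  exact action_generate_eq ps
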